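-- pv_equiv track=rewrite | github.com/Hakeem-Taha-06/Python2DGame | src/menu.py | get_highest_stats
-- ===== SOURCE A (Python) =====
-- def get_highest_stats(stats):
--     stat_list = {}
--     for character in stats:
--         for stat_name, value in stats[character].items():
--             if stat_name not in stat_list:
--                 stat_list[stat_name] = []
--             stat_list[stat_name].append(value)
--     highest_stats = []
--     for list in stat_list.values():
--         highest_stats.append(max(list))
--     return highest_stats
-- ===== SOURCE B (Python) =====
-- def get_highest_stats(stats):
--     best = {}
--     for character in stats:
--         for stat_name, value in stats[character].items():
--             if stat_name not in best:
--                 best[stat_name] = value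
--             else:
--                 best[stat_name] = max(best[stat_name], value)
--     return list(best.values())
-- ===== Notes on version B (the rewrite author's own statement) =====
-- stated objective: simpler
-- what changed: B keeps a single running maximum per stat name instead of accumulating a per-stat list of all values, so the second pass that maps max over the collected lists disappears and the result is just the dict's values.
import Mathlib
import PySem

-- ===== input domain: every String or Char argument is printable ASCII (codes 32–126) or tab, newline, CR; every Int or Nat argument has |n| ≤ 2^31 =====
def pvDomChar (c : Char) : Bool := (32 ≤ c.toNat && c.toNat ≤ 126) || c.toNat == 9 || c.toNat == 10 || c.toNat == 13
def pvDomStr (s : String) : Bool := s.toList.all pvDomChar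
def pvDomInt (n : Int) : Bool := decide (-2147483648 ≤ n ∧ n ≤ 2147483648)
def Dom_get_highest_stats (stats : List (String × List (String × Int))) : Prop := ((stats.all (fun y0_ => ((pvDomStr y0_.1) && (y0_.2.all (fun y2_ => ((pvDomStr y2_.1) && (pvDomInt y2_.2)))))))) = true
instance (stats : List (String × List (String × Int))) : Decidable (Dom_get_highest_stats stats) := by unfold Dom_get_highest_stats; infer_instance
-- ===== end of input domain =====

-- B replaces A's per-stat value lists (built in the double loop, reduced by max in a
-- second pass) with a single running maximum per stat name; the result is the dict's
-- values directly (objective: simpler).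


-- ===== PORT A =====
-- max(list): Python's built-in max on a list of ints; the `.getD 0` default is never
-- reached in A (every list gets a value appended right after it is created).
def pyMaxList (l : List Int) : Int := (PySem.List.max? l id).getD 0

def get_highest_stats (stats : List (String × List (String × Int))) : List Int :=
  let stat_list : PySem.Dict String (List Int) :=
    stats.foldl (fun d ch =>
      ch.2.foldl (fun d sv =>
        let d := if d.contains sv.1 = false then d.insert sv.1 [] else d
        d.modify sv.1 [] (fun l => l ++ [sv.2])) d) PySem.Dict.empty
  stat_list.values.foldl (fun hs l => hs ++ [pyMaxList l]) []

-- ===== PORT B =====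
def get_highest_stats_alt (stats : List (String × List (String × Int))) : List Int :=
  (stats.foldl (fun d ch =>
    ch.2.foldl (fun d sv =>
      match d.get? sv.1 with
      | none => d.insert sv.1 sv.2
      | some m => d.insert sv.1 (max m sv.2)) d) (PySem.Dict.empty : PySem.Dict String Int)).values

-- ===== PRECONDITION & SPEC =====
def Spec_get_highest_stats (stats : List (String × List (String × Int))) (out : List Int) : Prop := out = get_highest_stats_alt stats
instance (stats : List (String × List (String × Int))) (out : List Int) : Decidable (Spec_get_highest_stats stats out) := by unfold Spec_get_highest_stats; infer_instance

-- ===== CLAIM (what is proved, stated in full; the proofs are below) =====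
def Claim_equal_get_highest_stats : Prop := ∀ (stats : List (String × List (String × Int))), Dom_get_highest_stats stats → Spec_get_highest_stats stats (get_highest_stats stats)

-- ===== LEMMAS AND PROOFS =====

-- the two inner-loop step functions, as they appear in the ports
def stepA (d : PySem.Dict String (List Int)) (sv : String × Int) : PySem.Dict String (List Int) :=
  let d := if d.contains sv.1 = false then d.insert sv.1 [] else d
  d.modify sv.1 [] (fun l => l ++ [sv.2])

def stepB (d : PySem.Dict String Int) (sv : String × Int) : PySem.Dict String Int :=
  match d.get? sv.1 with
  | none => d.insert sv.1 sv.2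
  | some m => d.insert sv.1 (max m sv.2)

def maxStep (acc : Option Int) (x : Int) : Option Int :=
  match acc with
  | none => some x
  | some m => if m < x then some x else some m

lemma max?_eq_foldl_maxStep (l : List Int) : PySem.List.max? l id = l.foldl maxStep none := by
  rw [PySem.List.max?]
  exact PySem.List.foldl_congr_mem l _ maxStep none
    (fun acc x _ => by cases acc <;> rfl)

lemma foldl_maxStep_some (l : List Int) (a : Int) :
    l.foldl maxStep (some a) = some (l.foldl max a) := by
  induction l generalizing a with
  | nil => rfl
  | cons x xs ih =>
      simp only [List.foldl]
      rw [show maxStep (some a) x = some (max a x) by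
        by_cases h : a < x
        · simp [maxStep, h, max_eq_right (le_of_lt h)]
        · simp [maxStep, h, max_eq_left (not_lt.mp h)]]
      exact ih (max a x)

lemma pyMaxList_cons (x : Int) (xs : List Int) : pyMaxList (x :: xs) = xs.foldl max x := by
  simp [pyMaxList, max?_eq_foldl_maxStep, List.foldl, maxStep, foldl_maxStep_some]

lemma pyMaxList_append (l : List Int) (v : Int) (h : l ≠ []) :
    pyMaxList (l ++ [v]) = max (pyMaxList l) v := by
  cases l with
  | nil => exact absurd rfl h
  | cons x xs => simp [pyMaxList_cons, List.foldl_append]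

-- the invariant relating the two loop states
def DictRel (dA : PySem.Dict String (List Int)) (dB : PySem.Dict String Int) : Prop :=
  dA.keys = dB.keys ∧ dA.keys.Nodup ∧
  (∀ k, dB.getD k 0 = pyMaxList (dA.getD k [])) ∧
  (∀ k, k ∈ dA.keys → dA.getD k [] ≠ [])

lemma dictRel_step (dA : PySem.Dict String (List Int)) (dB : PySem.Dict String Int)
    (sv : String × Int) (h : DictRel dA dB) : DictRel (stepA dA sv) (stepB dB sv) := by
  obtain ⟨hkeys, hnd, hval, hne⟩ := h
  have hcB : dB.contains sv.1 = dA.contains sv.1 := by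
    simp [PySem.Dict.contains_eq_decide_mem_keys, hkeys]
  by_cases hc : dA.contains sv.1 = true
  · -- key already present: A appends to its list, B overwrites with the max
    have hmem : sv.1 ∈ dA.keys := by
      simpa [PySem.Dict.contains_eq_decide_mem_keys] using hc
    have hB : dB.get? sv.1 = some (dB.getD sv.1 0) := by
      have hco : dB.contains sv.1 = true := hcB ▸ hc
      rw [PySem.Dict.contains_eq_isSome_get?] at hco
      cases hgd : dB.get? sv.1 with
      | none => simp [hgd] at hco
      | some w => simp [PySem.Dict.getD_eq_get?_getD, hgd]
    have hkA : (stepA dA sv).keys = dA.keys := by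
      simp [stepA, hc, PySem.Dict.keys_modify,
        PySem.Dict.keys_insert_of_contains _ _ hc]
    have hAeq : stepA dA sv = dA.modify sv.1 [] (fun l => l ++ [sv.2]) := by
      simp [stepA, hc]
    have hBeq : stepB dB sv = dB.insert sv.1 (max (dB.getD sv.1 0) sv.2) := by
      simp [stepB, hB]
    refine ⟨?_, ?_, ?_, ?_⟩
    · rw [hkA, hBeq, PySem.Dict.keys_insert_of_contains _ _ (hcB ▸ hc), hkeys]
    · rw [hkA]; exact hnd
    · intro k
      rw [hAeq, hBeq, PySem.Dict.getD_modify, PySem.Dict.getD_insert]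
      by_cases hk : k = sv.1
      · rw [if_pos hk, if_pos hk, hval sv.1, pyMaxList_append _ _ (hne _ hmem)]
      · rw [if_neg hk, if_neg hk]; exact hval k
    · intro k hk
      rw [hAeq, PySem.Dict.getD_modify]
      by_cases h1 : k = sv.1
      · rw [if_pos h1]; simp
      · rw [if_neg h1]
        exact hne k (by rwa [hkA] at hk)
  · -- fresh key: A starts the list [sv.2], B stores sv.2
    have hc' : dA.contains sv.1 = false := by simpa using hc
    have hBnone : dB.get? sv.1 = none := by
      have hco : dB.contains sv.1 = false := hcB ▸ hc'
      rw [PySem.Dict.contains_eq_isSome_get?] at hco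
      simpa using hco
    have hnotmem : sv.1 ∉ dA.keys := by
      simpa [PySem.Dict.contains_eq_decide_mem_keys] using hc'
    have hcIns : (dA.insert sv.1 ([] : List Int)).contains sv.1 = true :=
      PySem.Dict.contains_insert_self _ _ _
    have hAeq : stepA dA sv = (dA.insert sv.1 []).modify sv.1 [] (fun l => l ++ [sv.2]) := by
      simp [stepA, hc']
    have hBeq : stepB dB sv = dB.insert sv.1 sv.2 := by
      simp [stepB, hBnone]
    have hkA : (stepA dA sv).keys = dA.keys ++ [sv.1] := by
      rw [hAeq, PySem.Dict.keys_modify,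
        PySem.Dict.keys_insert_of_contains _ _ hcIns,
        PySem.Dict.keys_insert_of_not_contains _ _ hc']
    have hgA : ∀ k, (stepA dA sv).getD k [] =
        if k = sv.1 then [sv.2] else dA.getD k [] := by
      intro k
      rw [hAeq, PySem.Dict.getD_modify]
      by_cases h1 : k = sv.1
      · subst h1; simp
      · simp [h1, PySem.Dict.getD_insert]
    refine ⟨?_, ?_, ?_, ?_⟩
    · rw [hkA, hBeq, PySem.Dict.keys_insert_of_not_contains _ _ (hcB ▸ hc'), hkeys]
    · rw [hkA]
      exact List.Nodup.append hnd (List.nodup_singleton _)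
        (List.disjoint_singleton.mpr hnotmem)
    · intro k
      rw [hgA k, hBeq, PySem.Dict.getD_insert]
      by_cases hk : k = sv.1
      · rw [if_pos hk, if_pos hk, pyMaxList_cons]; rfl
      · rw [if_neg hk, if_neg hk]; exact hval k
    · intro k hk
      rw [hgA k]
      by_cases h1 : k = sv.1
      · rw [if_pos h1]; simp
      · rw [if_neg h1]
        refine hne k ?_
        rw [hkA] at hk
        rcases List.mem_append.mp hk with h2 | h2
        · exact h2
        · exact absurd (List.mem_singleton.mp h2) h1

lemma dictRel_foldl (L : List (String × Int)) (dA : PySem.Dict String (List Int))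
    (dB : PySem.Dict String Int) (h : DictRel dA dB) :
    DictRel (L.foldl stepA dA) (L.foldl stepB dB) := by
  induction L generalizing dA dB with
  | nil => exact h
  | cons p ps ih => exact ih _ _ (dictRel_step dA dB p h)

lemma dictRel_empty : DictRel PySem.Dict.empty PySem.Dict.empty := by
  refine ⟨rfl, List.nodup_nil, fun k => ?_, fun k hk => by simp at hk⟩
  simp [PySem.Dict.getD_empty, pyMaxList, PySem.List.max?]

theorem get_highest_stats_spec : Claim_equal_get_highest_stats := by
  intro stats _
  unfold Spec_get_highest_stats get_highest_stats get_highest_stats_alt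
  rw [show (fun (d : PySem.Dict String (List Int)) (sv : String × Int) =>
        let d := if d.contains sv.1 = false then d.insert sv.1 ([] : List Int) else d
        d.modify sv.1 [] (fun l => l ++ [sv.2])) = stepA from rfl,
      show (fun (d : PySem.Dict String Int) (sv : String × Int) =>
        match d.get? sv.1 with
        | none => d.insert sv.1 sv.2
        | some m => d.insert sv.1 (max m sv.2)) = stepB from rfl]
  rw [show (fun (d : PySem.Dict String (List Int)) (ch : String × List (String × Int)) =>
        ch.2.foldl stepA d) = (fun d ch => List.foldl stepA d ((fun (ch : String × List (String × Int)) => ch.2) ch)) from rfl,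
      ← List.foldl_flatMap,
      show (fun (d : PySem.Dict String Int) (ch : String × List (String × Int)) =>
        ch.2.foldl stepB d) = (fun d ch => List.foldl stepB d ((fun (ch : String × List (String × Int)) => ch.2) ch)) from rfl,
      ← List.foldl_flatMap]
  obtain ⟨hkeys, hnd, hval, -⟩ :=
    dictRel_foldl (stats.flatMap (fun ch => ch.2)) PySem.Dict.empty PySem.Dict.empty dictRel_empty
  rw [PySem.List.foldl_append_singleton_eq_map,
      PySem.Dict.values_eq_map_keys _ hnd ([] : List Int),
      PySem.Dict.values_eq_map_keys _ (hkeys ▸ hnd) (0 : Int), ← hkeys]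
  simp only [List.nil_append, List.map_map]
  exact List.map_congr_left (fun k _ => (hval k).symm)
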